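-- pv_equiv track=rewrite | github.com/yuuka51/lambda-managed-instances-labs | src/lmi_lab/core/normalize.py | normalize_list_strict
-- ===== SOURCE A (Python) =====
-- from typing import Any
--
-- def normalize_null(value: Any) -> str:
--     if value is None:
--         return ""
--     return str(value).strip()
--
-- def _parse_int_or_str(token: str) -> tuple[int, int | str]:
--     try:
--         return (0, int(token))
--     except ValueError:
--         return (1, token)
--
-- def normalize_list_strict(value: Any, delimiter: str = "|") -> str:
--     raw = normalize_null(value)
--     if raw == "":
--         return ""
--     tokens = [p.strip() for p in raw.split(delimiter) if p.strip()]
--     keyed = [(_parse_int_or_str(token), token) for token in tokens]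
--     keyed.sort(key=lambda x: x[0])
--     return delimiter.join(str(v[0][1]) if v[0][0] == 0 else v[1] for v in keyed)
-- ===== SOURCE B (Python) =====
-- from typing import Any
--
-- def normalize_list_strict(value: Any, delimiter: str = "|") -> str:
--     raw = "" if value is None else str(value).strip()
--     if raw == "":
--         return ""
--     ints: list[int] = []
--     strs: list[str] = []
--     for piece in raw.split(delimiter):
--         tok = piece.strip()
--         if not tok:
--             continue
--         try:
--             ints.append(int(tok))
--         except ValueError:
--             strs.append(tok)
--     ints.sort()
--     strs.sort()
--     return delimiter.join([str(i) for i in ints] + strs)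
-- ===== Notes on version B (the rewrite author's own statement) =====
-- stated objective: simpler
-- what changed: Replaces A's single stable sort of (tag, int|str)-tuple-keyed pairs by a one-pass partition of the stripped tokens into an int bucket and a str bucket, each sorted independently and concatenated.
-- outside the precondition, e.g. on normalize_list_strict('a|b', ''): A raises ValueError, B raises ValueError
import Mathlib
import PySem

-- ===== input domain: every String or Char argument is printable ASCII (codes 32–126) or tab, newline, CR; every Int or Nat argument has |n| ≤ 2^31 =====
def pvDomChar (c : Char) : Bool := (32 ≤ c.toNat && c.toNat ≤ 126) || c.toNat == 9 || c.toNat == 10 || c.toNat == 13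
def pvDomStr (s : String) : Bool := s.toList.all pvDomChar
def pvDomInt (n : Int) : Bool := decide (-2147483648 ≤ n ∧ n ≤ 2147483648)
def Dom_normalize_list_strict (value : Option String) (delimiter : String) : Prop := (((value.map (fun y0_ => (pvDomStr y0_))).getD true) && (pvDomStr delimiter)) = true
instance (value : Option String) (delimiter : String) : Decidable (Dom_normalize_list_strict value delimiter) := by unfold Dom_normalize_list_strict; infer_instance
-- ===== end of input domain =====

-- B replaces A's single stable sort under a (tag, int|str) tuple key by a partition into an
-- int bucket and a str bucket, each sorted independently (objective: simpler decomposition).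

-- ===== PORT A =====
-- _parse_int_or_str(token): (0, int(token)) or, on ValueError, (1, token)
def pvParse (token : String) : Int × (Int ⊕ String) :=
  match PySem.Int.ofStr? token with
  | some n => (0, Sum.inl n)
  | none => (1, Sum.inr token)

-- Python '<' on the second tuple component; the cross-constructor cases are unreachable
-- (the tag 0/1 determines the constructor) and return false.
def pvPayloadLt : (Int ⊕ String) → (Int ⊕ String) → Bool
  | Sum.inl a, Sum.inl b => decide (a < b)
  | Sum.inr a, Sum.inr b => decide (a < b)
  | _, _ => false

-- Python's lexicographic tuple '<' on the sort keys
def pvKeyLt (p q : Int × (Int ⊕ String)) : Bool :=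
  decide (p.1 < q.1) || (p.1 == q.1 && pvPayloadLt p.2 q.2)

-- the comparison keyed.sort(key=lambda x: x[0]) sorts by
def pvCmpA (a b : (Int × (Int ⊕ String)) × String) : Bool := pvKeyLt a.1 b.1

-- str(v[0][1]) if v[0][0] == 0 else v[1]  (str of an int is toStr, str of a str is itself)
def pvRender (v : (Int × (Int ⊕ String)) × String) : String :=
  if v.1.1 == 0 then (match v.1.2 with | Sum.inl n => PySem.Int.toStr n | Sum.inr s => s) else v.2

def normalize_null (value : Option String) : String :=
  match value with
  | none => ""
  | some s => PySem.Str.strip s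

def normalize_list_strict (value : Option String) (delimiter : String) : String :=
  let raw := normalize_null value
  if raw = "" then ""
  else
    -- raw.split(delimiter); none only for delimiter = "" (ValueError, excluded by Pre_)
    let parts := (PySem.Str.split? raw delimiter).getD []
    let tokens := (parts.map PySem.Str.strip).filter (fun t => decide (t ≠ ""))
    let keyed := tokens.map (fun t => (pvParse t, t))
    -- keyed.sort(key=lambda x: x[0]): CPython's stable sort ported exactly as the stable
    -- insertion sort (each element inserted after existing equal keys), keys compared
    -- with Python's tuple '<' (pvCmpA)
    let sortedKeyed := keyed.foldl (fun acc x => PySem.List.insertBy pvCmpA x acc) []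
    PySem.Str.join delimiter (sortedKeyed.map pvRender)

-- ===== PORT B =====
-- the body of B's partition loop: strip the piece, skip it if empty, else append the
-- parsed int to the int bucket or the token to the str bucket
def pvBStep (acc : List Int × List String) (piece : String) : List Int × List String :=
  let tok := PySem.Str.strip piece
  if tok = "" then acc
  else match PySem.Int.ofStr? tok with
    | some n => (acc.1 ++ [n], acc.2)
    | none => (acc.1, acc.2 ++ [tok])

def normalize_list_strict_alt (value : Option String) (delimiter : String) : String :=
  let raw := match value with | none => "" | some s => PySem.Str.strip s
  if raw = "" then ""
  else
    let parts := (PySem.Str.split? raw delimiter).getD []   -- raises (none) only for delimiter = "", excluded by Pre_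
    let acc := parts.foldl pvBStep ([], [])
    PySem.Str.join delimiter
      ((PySem.List.sorted acc.1 (fun x => x)).map PySem.Int.toStr ++ PySem.List.sorted acc.2 (fun x => x))

-- ===== PRECONDITION & SPEC =====
-- Pre_ excludes only delimiter = "" together with a nonempty stripped value: there
-- Python's str.split raises ValueError (in both A and B).
def Pre_normalize_list_strict (value : Option String) (delimiter : String) : Prop :=
  delimiter ≠ "" ∨ (value.map PySem.Str.strip).getD "" = ""
instance (value : Option String) (delimiter : String) : Decidable (Pre_normalize_list_strict value delimiter) := by unfold Pre_normalize_list_strict; infer_instance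

def pvWitness_normalize_list_strict : Option String × String := (some " b | 07 | a | -2 ", "|")

def Spec_normalize_list_strict (value : Option String) (delimiter : String) (out : String) : Prop := out = normalize_list_strict_alt value delimiter
instance (value : Option String) (delimiter : String) (out : String) : Decidable (Spec_normalize_list_strict value delimiter out) := by unfold Spec_normalize_list_strict; infer_instance

-- ===== CLAIM (what is proved, stated in full; the proofs are below) =====
def Claim_equal_normalize_list_strict : Prop := ∀ (value : Option String) (delimiter : String), Dom_normalize_list_strict value delimiter → Pre_normalize_list_strict value delimiter → Spec_normalize_list_strict value delimiter (normalize_list_strict value delimiter)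

-- ===== LEMMAS AND PROOFS =====

-- the int bucket's elements as A keeps them, and the str bucket's
def pvEmbedI (p : Int × String) : (Int × (Int ⊕ String)) × String := ((0, Sum.inl p.1), p.2)
def pvEmbedS (s : String) : (Int × (Int ⊕ String)) × String := ((1, Sum.inr s), s)

def pvStepI (ti : List (Int × String)) (t : String) : List (Int × String) :=
  match PySem.Int.ofStr? t with
  | some n => PySem.List.insertBy (fun a b => decide (a.1 < b.1)) (n, t) ti
  | none => ti
def pvStepS (ts : List String) (t : String) : List String :=
  match PySem.Int.ofStr? t with
  | some _ => ts
  | none => PySem.List.insertBy (fun a b => decide (a < b)) t ts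

theorem pv_insertBy_nil {α : Type} (b : α → α → Bool) (x : α) :
    PySem.List.insertBy b x [] = [x] := rfl

theorem pv_insertBy_cons {α : Type} (b : α → α → Bool) (x y : α) (ys : List α) :
    PySem.List.insertBy b x (y :: ys) =
      if b x y then x :: y :: ys else y :: PySem.List.insertBy b x ys := rfl

-- insertion skips a prefix it is not before
theorem pv_insertBy_append_left {α : Type} (b : α → α → Bool) (x : α) (I S : List α)
    (h : ∀ y ∈ I, b x y = false) :
    PySem.List.insertBy b x (I ++ S) = I ++ PySem.List.insertBy b x S := by
  induction I with
  | nil => simp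
  | cons a I ih =>
    simp only [List.cons_append, pv_insertBy_cons, h a (by simp)]
    simp [ih (fun y hy => h y (by simp [hy]))]

-- insertion stays in a prefix all of whose successors it is before
theorem pv_insertBy_append_right {α : Type} (b : α → α → Bool) (x : α) (I S : List α)
    (h : ∀ y ∈ S, b x y = true) :
    PySem.List.insertBy b x (I ++ S) = PySem.List.insertBy b x I ++ S := by
  induction I with
  | nil =>
    cases S with
    | nil => simp
    | cons y ys => simp [pv_insertBy_cons, pv_insertBy_nil, h y (by simp)]
  | cons a I ih =>
    simp only [List.cons_append, pv_insertBy_cons]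
    by_cases hb : b x a = true
    · simp [hb]
    · simp only [Bool.not_eq_true] at hb
      simp [hb, ih]

theorem pv_cmp_embedI_embedI (p q : Int × String) :
    pvCmpA (pvEmbedI p) (pvEmbedI q) = decide (p.1 < q.1) := by
  simp [pvCmpA, pvEmbedI, pvKeyLt, pvPayloadLt]

theorem pv_cmp_embedS_embedS (s t : String) :
    pvCmpA (pvEmbedS s) (pvEmbedS t) = decide (s < t) := by
  simp [pvCmpA, pvEmbedS, pvKeyLt, pvPayloadLt]

theorem pv_cmp_embedI_embedS (p : Int × String) (s : String) :
    pvCmpA (pvEmbedI p) (pvEmbedS s) = true := by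
  simp [pvCmpA, pvEmbedI, pvEmbedS, pvKeyLt]

theorem pv_cmp_embedS_embedI (s : String) (p : Int × String) :
    pvCmpA (pvEmbedS s) (pvEmbedI p) = false := by
  simp [pvCmpA, pvEmbedI, pvEmbedS, pvKeyLt, pvPayloadLt]

theorem pv_insertBy_map_embedI (p : Int × String) (ti : List (Int × String)) :
    PySem.List.insertBy pvCmpA (pvEmbedI p) (ti.map pvEmbedI) =
      (PySem.List.insertBy (fun a b => decide (a.1 < b.1)) p ti).map pvEmbedI := by
  induction ti with
  | nil => simp [pv_insertBy_nil]
  | cons q ti ih =>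
    simp only [List.map_cons, pv_insertBy_cons, pv_cmp_embedI_embedI]
    by_cases h : p.1 < q.1
    · simp [h]
    · simp [h, ih]

theorem pv_insertBy_map_embedS (s : String) (ts : List String) :
    PySem.List.insertBy pvCmpA (pvEmbedS s) (ts.map pvEmbedS) =
      (PySem.List.insertBy (fun a b => decide (a < b)) s ts).map pvEmbedS := by
  induction ts with
  | nil => simp [pv_insertBy_nil]
  | cons t ts ih =>
    simp only [List.map_cons, pv_insertBy_cons, pv_cmp_embedS_embedS]
    by_cases h : s < t
    · simp [h]
    · simp [h, ih]

theorem pv_parse_int {t : String} {n : Int} (h : PySem.Int.ofStr? t = some n) :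
    (pvParse t, t) = pvEmbedI (n, t) := by
  simp [pvParse, pvEmbedI, h]

theorem pv_parse_str {t : String} (h : PySem.Int.ofStr? t = none) :
    (pvParse t, t) = pvEmbedS t := by
  simp [pvParse, pvEmbedS, h]

-- main loop invariant: A's insertion-sorted keyed list is the embedded int bucket
-- followed by the embedded str bucket
theorem pv_main_loop (tokens : List String) (ti : List (Int × String)) (ts : List String) :
    tokens.foldl (fun acc t => PySem.List.insertBy pvCmpA (pvParse t, t) acc)
        (ti.map pvEmbedI ++ ts.map pvEmbedS) =
      (tokens.foldl pvStepI ti).map pvEmbedI ++ (tokens.foldl pvStepS ts).map pvEmbedS := by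
  induction tokens generalizing ti ts with
  | nil => rfl
  | cons t tokens ih =>
    simp only [List.foldl_cons]
    cases h : PySem.Int.ofStr? t with
    | some n =>
      rw [pv_parse_int h,
        pv_insertBy_append_right _ _ _ _ (by
          intro y hy
          obtain ⟨s, _, rfl⟩ := List.mem_map.mp hy
          exact pv_cmp_embedI_embedS _ _),
        pv_insertBy_map_embedI]
      rw [show pvStepI ti t = PySem.List.insertBy (fun a b => decide (a.1 < b.1)) (n, t) ti by
        simp [pvStepI, h]]
      rw [show pvStepS ts t = ts by simp [pvStepS, h]]
      exact ih _ _
    | none =>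
      rw [pv_parse_str h,
        pv_insertBy_append_left _ _ _ _ (by
          intro y hy
          obtain ⟨p, _, rfl⟩ := List.mem_map.mp hy
          exact pv_cmp_embedS_embedI _ _),
        pv_insertBy_map_embedS]
      rw [show pvStepI ti t = ti by simp [pvStepI, h]]
      rw [show pvStepS ts t = PySem.List.insertBy (fun a b => decide (a < b)) t ts by
        simp [pvStepS, h]]
      exact ih _ _

-- the int-bucket loop, projected to the values, is the insertion sort of the parsed ints
theorem pv_insertBy_fst (p : Int × String) (ti : List (Int × String)) :
    (PySem.List.insertBy (fun a b => decide (a.1 < b.1)) p ti).map Prod.fst =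
      PySem.List.insertBy (fun a b => decide (a < b)) p.1 (ti.map Prod.fst) := by
  induction ti with
  | nil => simp [pv_insertBy_nil]
  | cons q ti ih =>
    simp only [List.map_cons, pv_insertBy_cons]
    by_cases h : p.1 < q.1
    · simp [h]
    · simp [h, ih]

theorem pv_foldl_stepI_fst (tokens : List String) (ti : List (Int × String)) :
    (tokens.foldl pvStepI ti).map Prod.fst =
      (tokens.filterMap PySem.Int.ofStr?).foldl
        (fun acc x => PySem.List.insertBy (fun a b => decide (a < b)) x acc) (ti.map Prod.fst) := by
  induction tokens generalizing ti with
  | nil => rfl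
  | cons t tokens ih =>
    cases h : PySem.Int.ofStr? t with
    | some n =>
      simp only [List.foldl_cons, List.filterMap_cons, h, List.foldl_cons]
      rw [show pvStepI ti t = PySem.List.insertBy (fun a b => decide (a.1 < b.1)) (n, t) ti by
        simp [pvStepI, h]]
      rw [ih, pv_insertBy_fst]
    | none =>
      simp only [List.foldl_cons, List.filterMap_cons, h]
      rw [show pvStepI ti t = ti by simp [pvStepI, h]]
      exact ih _

theorem pv_foldl_stepS (tokens : List String) (ts : List String) :
    tokens.foldl pvStepS ts =
      (tokens.filter (fun t => (PySem.Int.ofStr? t).isNone)).foldl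
        (fun acc x => PySem.List.insertBy (fun a b => decide (a < b)) x acc) ts := by
  induction tokens generalizing ts with
  | nil => rfl
  | cons t tokens ih =>
    cases h : PySem.Int.ofStr? t with
    | some n =>
      simp only [List.foldl_cons, List.filter_cons, h]
      rw [show pvStepS ts t = ts by simp [pvStepS, h]]
      simpa using ih _
    | none =>
      simp only [List.foldl_cons, List.filter_cons, h]
      rw [show pvStepS ts t = PySem.List.insertBy (fun a b => decide (a < b)) t ts by
        simp [pvStepS, h]]
      simpa using ih _

theorem pv_render_embedI (p : Int × String) : pvRender (pvEmbedI p) = PySem.Int.toStr p.1 := by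
  simp [pvRender, pvEmbedI]

theorem pv_render_embedS (s : String) : pvRender (pvEmbedS s) = s := by
  simp [pvRender, pvEmbedS]

-- B's partition loop collects the parsed ints and the non-int tokens, in order
theorem pv_b_loop (parts : List String) (i0 : List Int) (s0 : List String) :
    parts.foldl pvBStep (i0, s0) =
      (i0 ++ ((parts.map PySem.Str.strip).filter (fun t => decide (t ≠ ""))).filterMap PySem.Int.ofStr?,
       s0 ++ (((parts.map PySem.Str.strip).filter (fun t => decide (t ≠ ""))).filter
          (fun t => (PySem.Int.ofStr? t).isNone))) := by
  induction parts generalizing i0 s0 with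
  | nil => simp
  | cons piece parts ih =>
    rw [List.foldl_cons, List.map_cons, List.filter_cons]
    by_cases he : PySem.Str.strip piece = ""
    · rw [show pvBStep (i0, s0) piece = (i0, s0) by simp [pvBStep, he]]
      rw [ih]
      simp [he]
    · cases h : PySem.Int.ofStr? (PySem.Str.strip piece) with
      | some n =>
        rw [show pvBStep (i0, s0) piece = (i0 ++ [n], s0) by simp [pvBStep, he, h]]
        rw [ih]
        simp [he, h]
      | none =>
        rw [show pvBStep (i0, s0) piece = (i0, s0 ++ [PySem.Str.strip piece]) by
          simp [pvBStep, he, h]]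
        rw [ih]
        simp [he, h]

-- the common core: for the same token list, A's rendered sorted keyed list is B's
-- rendered pair of sorted buckets
theorem pv_core (tokens : List String) :
    List.map pvRender
        ((tokens.map (fun t => (pvParse t, t))).foldl
          (fun acc x => PySem.List.insertBy pvCmpA x acc) []) =
      (PySem.List.sorted (tokens.filterMap PySem.Int.ofStr?) (fun x => x)).map PySem.Int.toStr ++
        PySem.List.sorted (tokens.filter (fun t => (PySem.Int.ofStr? t).isNone)) (fun x => x) := by
  have h1 : (tokens.map (fun t => (pvParse t, t))).foldl
      (fun acc x => PySem.List.insertBy pvCmpA x acc) [] =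
      (tokens.foldl pvStepI []).map pvEmbedI ++ (tokens.foldl pvStepS []).map pvEmbedS := by
    rw [List.foldl_map]
    exact pv_main_loop tokens [] []
  rw [h1, List.map_append, List.map_map, List.map_map]
  congr 1
  · have h2 : pvRender ∘ pvEmbedI = PySem.Int.toStr ∘ Prod.fst := by
      funext p; simp [pv_render_embedI]
    rw [h2, ← List.map_map, pv_foldl_stepI_fst]
    rw [PySem.List.sorted_eq_foldl_insertBy]
    rfl
  · have h2 : pvRender ∘ pvEmbedS = id := by
      funext s; simp [pv_render_embedS]
    rw [h2, List.map_id, pv_foldl_stepS]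
    rw [PySem.List.sorted_eq_foldl_insertBy]

-- ===== VERDICT (by name: the statement is the Claim_ definition above) =====
theorem normalize_list_strict_spec : Claim_equal_normalize_list_strict := by
  intro value delimiter _ _
  unfold Spec_normalize_list_strict normalize_list_strict normalize_list_strict_alt normalize_null
  cases value with
  | none => rfl
  | some s =>
    by_cases hraw : PySem.Str.strip s = ""
    · simp [hraw]
    · simp only [if_neg hraw]
      rw [pv_b_loop]
      simp only [List.nil_append]
      exact congrArg (PySem.Str.join delimiter) (pv_core _)
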